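-- pv_equiv track=rewrite | github.com/shivam-singh-au17/Accomplish_classes- | coding-challenges/week08/day04/week08-day04-cc.py | sumOfRightDiagonal
-- ===== SOURCE A (Python) =====
-- def sumOfRightDiagonal(matrix):
--     row = len(matrix)
--     col = len(matrix[0])
--     rightDiagonalSum = 0
--
--     for i  in range(row):
--         for j in range(col):
--             if i == row-j-1:
--                 rightDiagonalSum += matrix[i][j]
--
--     return rightDiagonalSum
-- ===== SOURCE B (Python) =====
-- def sumOfRightDiagonal(matrix):
--     # Walk the anti-diagonal directly: the k-th row from the bottom contributes
--     # its k-th entry, stopping at the width of the first row.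
--     total = 0
--     for k, row_vals in enumerate(reversed(matrix)):
--         if k == len(matrix[0]):
--             break
--         total += row_vals[k]
--     return total
-- ===== Notes on version B (the rewrite author's own statement) =====
-- stated objective: faster
-- what changed: A scans every cell of the matrix with nested loops testing i == row-j-1; B makes a single bottom-up pass over reversed(matrix), adding the k-th entry of the k-th row from the bottom and stopping at the first row's width, so the inner column scan disappears.
import Mathlib
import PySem

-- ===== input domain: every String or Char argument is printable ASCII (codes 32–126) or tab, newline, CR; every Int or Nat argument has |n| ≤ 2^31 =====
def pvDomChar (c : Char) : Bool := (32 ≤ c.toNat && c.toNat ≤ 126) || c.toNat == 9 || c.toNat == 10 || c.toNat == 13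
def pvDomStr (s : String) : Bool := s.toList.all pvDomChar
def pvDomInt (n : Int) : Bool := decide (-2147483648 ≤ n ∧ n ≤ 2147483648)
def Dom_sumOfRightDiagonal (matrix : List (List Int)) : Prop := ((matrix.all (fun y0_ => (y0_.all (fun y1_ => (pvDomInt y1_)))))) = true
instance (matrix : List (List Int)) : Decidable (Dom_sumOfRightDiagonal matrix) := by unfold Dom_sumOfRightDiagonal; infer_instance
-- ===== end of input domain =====

-- B replaces A's nested scan of all row*col cells by ONE bottom-up pass over
-- reversed(matrix) that directly adds the k-th entry of the k-th row from the
-- bottom, stopping at the first row's width (objective: faster, O(n) vs O(n*m)).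


-- ===== PORT A =====
-- row = len(matrix); col = len(matrix[0]); the nested i/j loops; matrix[i][j] is
-- totalised with .getD 0 — exact wherever Python does not raise (Pre_ below).
def sumOfRightDiagonal (matrix : List (List Int)) : Int :=
  (PySem.List.pyRange 0 (matrix.length : Int) 1).foldl (fun s i =>
    (PySem.List.pyRange 0 (((PySem.List.pyGet? matrix 0).getD []).length : Int) 1).foldl
      (fun s j =>
        if i = (matrix.length : Int) - j - 1 then
          s + (((PySem.List.pyGet? matrix i).bind (fun r => PySem.List.pyGet? r j)).getD 0)
        else s) s) 0

-- ===== PORT B =====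
-- the 'for k, row_vals in enumerate(reversed(matrix))' loop with its break is the
-- structural recursion altGo over matrix.reverse carrying the counter k;
-- row_vals[k] is totalised with .getD 0 — exact wherever Python does not raise.
def altGo (col : Int) : List (List Int) → Int → Int
  | [], _ => 0
  | r :: rs, k =>
    if k = col then 0
    else (PySem.List.pyGet? r k).getD 0 + altGo col rs (k + 1)

def sumOfRightDiagonal_alt (matrix : List (List Int)) : Int :=
  altGo (((PySem.List.pyGet? matrix 0).getD []).length : Int) matrix.reverse 0

-- ===== PRECONDITION & SPEC =====
-- Pre_ excludes exactly the inputs on which Python A raises an IndexError: the empty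
-- matrix (matrix[0]) and ragged matrices whose row i is shorter than the anti-diagonal
-- access matrix[i][row-1-i] that A performs.
def Pre_sumOfRightDiagonal (matrix : List (List Int)) : Prop :=
  matrix ≠ [] ∧
  ∀ i < matrix.length,
    matrix.length - 1 - i < (matrix.headD []).length →
    matrix.length - 1 - i < (matrix.getD i []).length
instance (matrix : List (List Int)) : Decidable (Pre_sumOfRightDiagonal matrix) := by
  unfold Pre_sumOfRightDiagonal; infer_instance
def pvWitness_sumOfRightDiagonal : List (List Int) := [[1, 2], [3, 4]]
def Spec_sumOfRightDiagonal (matrix : List (List Int)) (out : Int) : Prop := out = sumOfRightDiagonal_alt matrix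
instance (matrix : List (List Int)) (out : Int) : Decidable (Spec_sumOfRightDiagonal matrix out) := by unfold Spec_sumOfRightDiagonal; infer_instance

-- ===== CLAIM (what is proved, stated in full; the proofs are below) =====
def Claim_equal_sumOfRightDiagonal : Prop := ∀ (matrix : List (List Int)), Dom_sumOfRightDiagonal matrix → Pre_sumOfRightDiagonal matrix → Spec_sumOfRightDiagonal matrix (sumOfRightDiagonal matrix)

-- ===== LEMMAS AND PROOFS =====

-- a sum of a single-hit indicator over range(a, a+n) picks out the one term j = t
lemma sum_ite_pyRange_aux (g : Int → Int) (t : Int) :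
    ∀ (n : Nat) (a : Int),
    ((PySem.List.pyRange a (a + (n : Int)) 1).map (fun j => if j = t then g j else 0)).sum
      = if a ≤ t ∧ t < a + (n : Int) then g t else 0 := by
  intro n
  induction n with
  | zero =>
    intro a
    rw [PySem.List.pyRange_one_eq_nil (by omega)]
    simp only [List.map_nil, List.sum_nil]
    rw [if_neg (by omega)]
  | succ k ih =>
    intro a
    have hb : a + ((k + 1 : Nat) : Int) = (a + 1) + (k : Int) := by push_cast; ring
    rw [hb, PySem.List.pyRange_one_cons (by omega)]
    simp only [List.map_cons, List.sum_cons]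
    have := ih (a + 1)
    push_cast at this
    rw [this]
    by_cases hat : a = t
    · subst hat
      rw [if_pos rfl, if_neg (by omega), if_pos (by omega), add_zero]
    · rw [if_neg hat, zero_add]
      have hiff : (a + 1 ≤ t ∧ t < a + 1 + (k : Int)) ↔ (a ≤ t ∧ t < a + 1 + (k : Int)) := by
        omega
      simp only [hiff]

-- the same for an arbitrary range(a, b)
lemma sum_ite_pyRange (g : Int → Int) (t a b : Int) :
    ((PySem.List.pyRange a b 1).map (fun j => if j = t then g j else 0)).sum
      = if a ≤ t ∧ t < b then g t else 0 := by
  by_cases h : b ≤ a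
  · rw [PySem.List.pyRange_one_eq_nil h]
    simp only [List.map_nil, List.sum_nil]
    rw [if_neg (by omega)]
  · have hb : b = a + ((b - a).toNat : Int) := by omega
    rw [hb]
    exact sum_ite_pyRange_aux g t (b - a).toNat a

-- A's inner j-loop contributes exactly the one cell j = row-1-i (when it is in range)
lemma inner_eq (g : Int → Int) (row col i s : Int) :
    (PySem.List.pyRange 0 col 1).foldl
      (fun s j => if i = row - j - 1 then s + g j else s) s
    = s + (if 0 ≤ row - 1 - i ∧ row - 1 - i < col then g (row - 1 - i) else 0) := by
  have hfun : (fun (s j : Int) => if i = row - j - 1 then s + g j else s)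
      = (fun (s j : Int) => s + (if j = row - 1 - i then g j else 0)) := by
    funext s j
    by_cases h : i = row - j - 1
    · rw [if_pos h, if_pos (by omega)]
    · rw [if_neg h, if_neg (by omega), add_zero]
  rw [hfun, PySem.List.foldl_add, sum_ite_pyRange]

-- the sum of a map over range(0, n) is the Finset.range sum
lemma sum_map_pyRange_zero (g : Int → Int) : ∀ (n : Nat),
    ((PySem.List.pyRange 0 (n : Int) 1).map g).sum = ∑ j ∈ Finset.range n, g (j : Int) := by
  intro n
  induction n with
  | zero => rw [PySem.List.pyRange_one_eq_nil (by omega)]; simp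
  | succ k ih =>
    have hb : ((k + 1 : Nat) : Int) = (k : Int) + 1 := by push_cast; ring
    rw [hb, PySem.List.pyRange_one_succ_right (by positivity), List.map_append,
        List.sum_append, ih, Finset.sum_range_succ]
    simp

-- A as a Finset sum over the anti-diagonal index k (counted from the bottom row)
lemma a_eq_sum (matrix : List (List Int)) :
    sumOfRightDiagonal matrix
      = ∑ k ∈ Finset.range matrix.length,
          (if (k : Int) < (((PySem.List.pyGet? matrix 0).getD []).length : Int) then
            (((PySem.List.pyGet? matrix ((matrix.length : Int) - 1 - (k : Int))).bind
                (fun r => PySem.List.pyGet? r ((k : Int)))).getD 0)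
          else 0) := by
  unfold sumOfRightDiagonal
  set row : Int := (matrix.length : Int) with hrow
  set col : Int := (((PySem.List.pyGet? matrix 0).getD []).length : Int) with hcol
  have hout : (fun (s i : Int) =>
      (PySem.List.pyRange 0 col 1).foldl
        (fun s j => if i = row - j - 1 then
            s + (((PySem.List.pyGet? matrix i).bind (fun r => PySem.List.pyGet? r j)).getD 0)
          else s) s)
      = (fun (s i : Int) =>
          s + (if 0 ≤ row - 1 - i ∧ row - 1 - i < col then
                (((PySem.List.pyGet? matrix i).bind
                    (fun r => PySem.List.pyGet? r (row - 1 - i))).getD 0)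
              else 0)) := by
    funext s i
    exact inner_eq (fun j => (((PySem.List.pyGet? matrix i).bind
      (fun r => PySem.List.pyGet? r j)).getD 0)) row col i s
  rw [hout, PySem.List.foldl_add, zero_add, sum_map_pyRange_zero]
  rw [← Finset.sum_range_reflect]
  apply Finset.sum_congr rfl
  intro j hj
  have hjlt : j < matrix.length := Finset.mem_range.mp hj
  have hcast : ((matrix.length - 1 - j : Nat) : Int) = row - 1 - (j : Int) := by
    rw [hrow]; omega
  rw [hcast]
  have hk : row - 1 - (row - 1 - (j : Int)) = (j : Int) := by ring
  rw [hk]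
  by_cases h : (j : Int) < col
  · rw [if_pos ⟨by positivity, h⟩, if_pos h]
  · rw [if_neg (by omega), if_neg h]

-- B's recursion as a Finset sum over the rows it visits
lemma altGo_eq_sum (col : Int) :
    ∀ (L : List (List Int)) (k : Int), 0 ≤ k → k ≤ col →
    altGo col L k
      = ∑ j ∈ Finset.range L.length,
          (if k + (j : Int) < col then
            (PySem.List.pyGet? (L.getD j []) (k + (j : Int))).getD 0
          else 0) := by
  intro L
  induction L with
  | nil => intro k _ _; simp [altGo]
  | cons r rs ih =>
    intro k hk0 hkc
    rw [altGo]
    by_cases hkcol : k = col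
    · rw [if_pos hkcol]
      refine (Finset.sum_eq_zero ?_).symm
      intro j _
      rw [if_neg (by omega)]
    · rw [if_neg hkcol, ih (k + 1) (by omega) (by omega)]
      rw [List.length_cons, Finset.sum_range_succ']
      have hterm0 : (if k + ((0 : Nat) : Int) < col then
          (PySem.List.pyGet? ((r :: rs).getD 0 []) (k + ((0 : Nat) : Int))).getD 0 else 0)
          = (PySem.List.pyGet? r k).getD 0 := by
        rw [if_pos (by omega)]
        norm_num
      rw [hterm0, add_comm]
      congr 1
      apply Finset.sum_congr rfl
      intro j _
      have h1 : k + 1 + (j : Int) = k + ((j + 1 : Nat) : Int) := by push_cast; ring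
      have h2 : (rs.getD j []) = ((r :: rs).getD (j + 1) []) := by simp
      rw [h1, h2]

-- the two ports agree on EVERY input (both totalise out-of-range accesses with 0)
lemma ports_eq (matrix : List (List Int)) :
    sumOfRightDiagonal matrix = sumOfRightDiagonal_alt matrix := by
  unfold sumOfRightDiagonal_alt
  rw [a_eq_sum,
      altGo_eq_sum (((PySem.List.pyGet? matrix 0).getD []).length : Int)
        matrix.reverse 0 (by omega) (by positivity)]
  rw [List.length_reverse]
  apply Finset.sum_congr rfl
  intro k hk
  have hklt : k < matrix.length := Finset.mem_range.mp hk
  rw [zero_add]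
  by_cases h : (k : Int) < (((PySem.List.pyGet? matrix 0).getD []).length : Int)
  · rw [if_pos h, if_pos h]
    have hcast : ((matrix.length : Int) - 1 - (k : Int)) = ((matrix.length - 1 - k : Nat) : Int) := by
      omega
    rw [hcast, PySem.List.pyGet?_natCast]
    have hidx : matrix.length - 1 - k < matrix.length := by omega
    rw [List.getElem?_eq_getElem hidx]
    have hrev : matrix.reverse.getD k [] = matrix[matrix.length - 1 - k] := by
      rw [List.getD_eq_getElem _ _ (by simpa using hklt)]
      rw [List.getElem_reverse]
    rw [hrev]
    rfl
  · rw [if_neg h, if_neg h]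

-- ===== VERDICT (by name: the statement is the Claim_ definition above) =====
theorem sumOfRightDiagonal_spec : Claim_equal_sumOfRightDiagonal := by
  intro matrix _ _
  unfold Spec_sumOfRightDiagonal
  exact ports_eq matrix
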